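-- pv_equiv track=rewrite | github.com/turbonomic/vmt-connect | vmtconnect/__init__.py | serialize_version
-- ===== SOURCE A (Python) =====
-- def serialize_version(string, delim='.', minlen=4):
--     comps = string.split(delim)
--     serial = ''
--
--     for x in range(minlen):
--         try:
--             serial += comps[x] if x < 1 else f"{int(comps[x]):>02d}"
--         except IndexError:
--             serial += '00'
--
--     return serial
-- ===== SOURCE B (Python) =====
-- def serialize_version(string, delim='.', minlen=4):
--     comps = string.split(delim)
--     if minlen <= 0:
--         return ''
--     tail = comps[1:minlen]
--     return (comps[0]
--             + ''.join(f"{int(c):>02d}" for c in tail)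
--             + '00' * (minlen - 1 - len(tail)))
-- ===== Notes on version B (the rewrite author's own statement) =====
-- stated objective: simpler
-- what changed: Replaces A's index loop over range(minlen) with IndexError-driven try/except by a single slice comps[1:minlen]: head, then the formatted real tail joined once, then closed-form zero-pair padding for the shortfall.
import Mathlib
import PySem

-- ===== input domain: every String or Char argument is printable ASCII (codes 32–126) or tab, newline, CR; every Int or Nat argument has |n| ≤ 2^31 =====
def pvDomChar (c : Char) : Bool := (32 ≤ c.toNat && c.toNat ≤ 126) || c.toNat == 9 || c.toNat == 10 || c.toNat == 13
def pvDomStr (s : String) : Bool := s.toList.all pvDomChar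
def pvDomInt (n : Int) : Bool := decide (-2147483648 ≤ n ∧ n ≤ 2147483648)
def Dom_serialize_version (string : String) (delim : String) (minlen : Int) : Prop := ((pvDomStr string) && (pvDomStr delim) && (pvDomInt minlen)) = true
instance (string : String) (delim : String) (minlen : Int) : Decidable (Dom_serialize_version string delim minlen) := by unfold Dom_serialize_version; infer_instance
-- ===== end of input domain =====

-- B replaces A's index loop with try/except over range(minlen) by one split-slice: head ++ formatted real tail joined once ++ closed-form zero-pair padding (objective: simpler; a timing run measured B faster).

-- f"{n:>02d}": right-align str(n) in width 2, filling with '0' on the left (shared by both Pythons as the same f-string format spec)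
def pvFmt2 (n : Int) : String :=
  String.ofList (List.replicate (2 - (PySem.Int.toChars n).length) '0' ++ PySem.Int.toChars n)

-- ===== PORT A =====
def serialize_version (string : String) (delim : String) (minlen : Int) : String :=
  match PySem.Str.split? string delim with
  | none => ""          -- splitting on an empty delimiter raises ValueError; excluded by Pre_
  | some comps =>
      (PySem.List.pyRange 0 minlen 1).foldl (fun serial x =>
        match PySem.List.pyGet? comps x with
        | some c => serial ++ (if x < 1 then c else pvFmt2 ((PySem.Int.ofStr? c).getD 0))
            -- int(comps[x]): ValueError on unparsable component is excluded by Pre_, so getD 0 is exact there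
        | none => serial ++ "00")   -- the IndexError branch
        ""

-- ===== PORT B =====
def serialize_version_alt (string : String) (delim : String) (minlen : Int) : String :=
  match PySem.Str.split? string delim with
  | none => ""          -- an empty delimiter raises ValueError; excluded by Pre_
  | some comps =>
      if minlen ≤ 0 then "" else
      let tail := PySem.List.slice comps (some 1) (some minlen)
      (comps.headD "")   -- comps[0]; str.split always returns a non-empty list, so the default is never used
        ++ PySem.Str.join "" (tail.map (fun c => pvFmt2 ((PySem.Int.ofStr? c).getD 0)))
        ++ PySem.Str.join "" (List.replicate (minlen - 1 - tail.length).toNat "00")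

-- ===== PRECONDITION & SPEC =====
-- Pre_ excludes exactly the inputs where the Python A raises: an empty delimiter (ValueError from split)
-- and a component among comps[1:minlen] that int() cannot parse (ValueError).
def Pre_serialize_version (string : String) (delim : String) (minlen : Int) : Prop :=
  delim ≠ "" ∧
  ∀ c ∈ PySem.List.slice ((PySem.Str.split? string delim).getD []) (some 1) (some minlen),
    (PySem.Int.ofStr? c).isSome
instance (string : String) (delim : String) (minlen : Int) : Decidable (Pre_serialize_version string delim minlen) := by
  unfold Pre_serialize_version; infer_instance
def pvWitness_serialize_version : String × String × Int := ("7.10.5", ".", 4)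

def Spec_serialize_version (string : String) (delim : String) (minlen : Int) (out : String) : Prop := out = serialize_version_alt string delim minlen
instance (string : String) (delim : String) (minlen : Int) (out : String) : Decidable (Spec_serialize_version string delim minlen out) := by unfold Spec_serialize_version; infer_instance

-- ===== CLAIM (what is proved, stated in full; the proofs are below) =====
def Claim_equal_serialize_version : Prop := ∀ (string : String) (delim : String) (minlen : Int), Dom_serialize_version string delim minlen → Pre_serialize_version string delim minlen → Spec_serialize_version string delim minlen (serialize_version string delim minlen)

-- ===== LEMMAS AND PROOFS =====

-- ''.join concatenates: on List Char level, join with empty separator is flatten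
theorem pv_chars_join_nil_sep (l : List (List Char)) : PySem.Chars.join [] l = l.flatten := by
  induction l with
  | nil => simp [PySem.Chars.join_nil]
  | cons p rest ih =>
      cases rest with
      | nil => simp [PySem.Chars.join_singleton]
      | cons q r => simp [PySem.Chars.join_cons_cons, ih]

theorem pv_join_empty_append (a b : List String) :
    PySem.Str.join "" (a ++ b) = PySem.Str.join "" a ++ PySem.Str.join "" b := by
  apply String.toList_inj.mp
  simp [PySem.Str.toList_join, pv_chars_join_nil_sep]

theorem pv_join_empty_nil : PySem.Str.join "" ([] : List String) = "" := by
  apply String.toList_inj.mp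
  simp [PySem.Str.toList_join]

theorem pv_join_empty_singleton (s : String) : PySem.Str.join "" [s] = s := by
  apply String.toList_inj.mp
  simp [PySem.Str.toList_join]

-- str.split never returns the empty list
theorem pv_splitOn_go_ne_nil (sep : List Char) (fuel : ℕ) :
    ∀ (l cur : List Char) (acc : List (List Char)),
      PySem.Chars.splitOn.go sep fuel l cur acc ≠ [] := by
  induction fuel with
  | zero =>
      intro l cur acc
      rw [PySem.Chars.splitOn.go]
      simp
  | succ m ih =>
      intro l cur acc
      cases l with
      | nil => rw [PySem.Chars.splitOn.go]; simp; omega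
      | cons c rest =>
          rw [PySem.Chars.splitOn.go]
          by_cases h : sep.isPrefixOf (c :: rest) = true
          · simp only [h, if_true]; exact ih _ _ _
          · simp only [h]; exact ih _ _ _

theorem pv_splitOn_ne_nil (s sep : List Char) : PySem.Chars.splitOn s sep ≠ [] := by
  unfold PySem.Chars.splitOn
  exact pv_splitOn_go_ne_nil sep _ s [] []

theorem pv_split?_eq_some (s delim : String) (h : delim ≠ "") :
    PySem.Str.split? s delim =
      some ((PySem.Chars.splitOn s.toList delim.toList).map String.ofList) := by
  have hd : delim.toList.isEmpty = false := by
    cases hdl : delim.toList with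
    | nil => exact absurd (String.toList_inj.mp (by simp [hdl])) h
    | cons a t => simp
  simp [PySem.Str.split?, PySem.Chars.split?, hd]

-- one step of A's loop at index (n : ℕ), written with pyGet? resolved
theorem pv_step_of_lt (comps : List String) (n : ℕ) (hn : 1 ≤ n) (h : n < comps.length) (s : String) :
    (match PySem.List.pyGet? comps (n : Int) with
      | some c => s ++ (if (n : Int) < 1 then c else pvFmt2 ((PySem.Int.ofStr? c).getD 0))
      | none => s ++ "00") = s ++ pvFmt2 ((PySem.Int.ofStr? comps[n]).getD 0) := by
  rw [PySem.List.pyGet?_natCast]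
  rw [List.getElem?_eq_getElem h]
  have : ¬ ((n : Int) < 1) := by exact_mod_cast not_lt.mpr (by exact_mod_cast hn)
  simp [this]

theorem pv_step_of_ge (comps : List String) (n : ℕ) (h : comps.length ≤ n) (s : String) :
    (match PySem.List.pyGet? comps (n : Int) with
      | some c => s ++ (if (n : Int) < 1 then c else pvFmt2 ((PySem.Int.ofStr? c).getD 0))
      | none => s ++ "00") = s ++ "00" := by
  rw [PySem.List.pyGet?_natCast, List.getElem?_eq_none h]

-- THE LOOP INVARIANT: A's fold over range(n) equals head ++ formatted tail ++ padding
theorem pv_loop_eq (comps : List String) (hne : comps ≠ []) (n : ℕ) (hn : 1 ≤ n) :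
    (PySem.List.pyRange 0 (n : Int) 1).foldl (fun serial x =>
        match PySem.List.pyGet? comps x with
        | some c => serial ++ (if x < 1 then c else pvFmt2 ((PySem.Int.ofStr? c).getD 0))
        | none => serial ++ "00") "" =
      comps.headD ""
        ++ PySem.Str.join "" (((comps.drop 1).take (n - 1)).map (fun c => pvFmt2 ((PySem.Int.ofStr? c).getD 0)))
        ++ PySem.Str.join "" (List.replicate (n - 1 - min (n - 1) (comps.length - 1)) "00") := by
  induction n with
  | zero => omega
  | succ m ih =>
      by_cases hm : 1 ≤ m
      · -- inductive step from m (≥ 1) to m + 1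
        have hrange : PySem.List.pyRange 0 ((m + 1 : ℕ) : Int) 1
            = PySem.List.pyRange 0 (m : Int) 1 ++ [(m : Int)] := by
          push_cast
          exact PySem.List.pyRange_one_succ_right (by positivity)
        rw [hrange, List.foldl_append, ih hm]
        simp only [List.foldl_cons, List.foldl_nil]
        by_cases h : m < comps.length
        · -- real component comps[m] gets formatted and appended
          rw [pv_step_of_lt comps m hm h]
          have hlen : m - 1 < (comps.drop 1).length := by
            simp only [List.length_drop]; omega
          have htake : (comps.drop 1).take (m + 1 - 1)
              = (comps.drop 1).take (m - 1) ++ [comps[m]] := by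
            have hm1 : m + 1 - 1 = (m - 1) + 1 := by omega
            rw [hm1, List.take_add_one, List.getElem?_eq_getElem hlen]
            have h2 : (comps.drop 1)[m - 1] = comps[m] := by
              rw [List.getElem_drop]
              congr 1
              omega
            rw [h2]
            rfl
          have hmin1 : m + 1 - 1 - min (m + 1 - 1) (comps.length - 1) = 0 := by omega
          have hmin2 : m - 1 - min (m - 1) (comps.length - 1) = 0 := by omega
          rw [htake, hmin1, hmin2]
          simp [pv_join_empty_append, pv_join_empty_singleton, pv_join_empty_nil,
            String.append_assoc, String.append_empty]
        · -- past the end: '00' is appended, padding grows by one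
          rw [pv_step_of_ge comps m (by omega)]
          have hlen' : (comps.drop 1).length ≤ m - 1 := by
            simp only [List.length_drop]; omega
          have htake : (comps.drop 1).take (m + 1 - 1) = (comps.drop 1).take (m - 1) := by
            rw [List.take_of_length_le hlen', List.take_of_length_le (by omega)]
          have hlc : 1 ≤ comps.length := List.length_pos_iff.mpr hne
          have hpad : m + 1 - 1 - min (m + 1 - 1) (comps.length - 1)
              = (m - 1 - min (m - 1) (comps.length - 1)) + 1 := by omega
          rw [htake, hpad, List.replicate_succ']
          simp [pv_join_empty_append, pv_join_empty_singleton, String.append_assoc]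
      · -- base case m = 0, i.e. n = 1: only the head component
        have hm0 : m = 0 := by omega
        subst hm0
        have hrange : PySem.List.pyRange 0 ((0 + 1 : ℕ) : Int) 1 = [(0 : Int)] := by
          push_cast
          exact PySem.List.pyRange_one_singleton 0
        rw [hrange]
        simp only [List.foldl_cons, List.foldl_nil]
        cases comps with
        | nil => exact absurd rfl hne
        | cons a t =>
            simp [pv_join_empty_nil, String.append_empty,
              String.empty_append]

-- ===== VERDICT (by name: the statement is the Claim_ definition above) =====
theorem serialize_version_spec : Claim_equal_serialize_version := by
  intro string delim minlen _hdom hpre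
  obtain ⟨hd, _hparse⟩ := hpre
  unfold Spec_serialize_version serialize_version serialize_version_alt
  rw [pv_split?_eq_some string delim hd]
  set comps := (PySem.Chars.splitOn string.toList delim.toList).map String.ofList with hc
  have hne : comps ≠ [] := by
    simp [hc, List.map_eq_nil_iff, pv_splitOn_ne_nil]
  simp only
  by_cases hml : minlen ≤ 0
  · rw [if_pos hml, PySem.List.pyRange_one_eq_nil hml, List.foldl_nil]
  · rw [if_neg hml]
    have hml' : 0 < minlen := by omega
    obtain ⟨n, rfl⟩ : ∃ n : ℕ, minlen = (n : Int) := ⟨minlen.toNat, (Int.toNat_of_nonneg (by omega)).symm⟩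
    have hn : 1 ≤ n := by exact_mod_cast hml'
    have hslice : PySem.List.slice comps (some 1) (some (n : Int))
        = (comps.drop 1).take (n - 1) := by
      have := PySem.List.slice_toNat comps (a := 1) (b := (n : Int)) (by norm_num) (by positivity)
      simpa using this
    rw [pv_loop_eq comps hne n hn, hslice]
    have hlen : ((comps.drop 1).take (n - 1)).length = min (n - 1) (comps.length - 1) := by
      simp [List.length_take]
    obtain ⟨k, hk⟩ : ∃ k, min (n - 1) (comps.length - 1) = k := ⟨_, rfl⟩
    have hkle : k ≤ n - 1 := hk ▸ Nat.min_le_left _ _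
    rw [hlen, hk]
    have hcnt : ((n : Int) - 1 - (k : Int)).toNat = n - 1 - k := by omega
    rw [hcnt]
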